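-- pv_equiv track=rewrite | github.com/MateoAguirreO/EstructuradeDatos | Recursividad/MagicSquare.py | SolveSquare
-- ===== SOURCE A (Python) =====
-- n = 3
--
-- def isValid(board, row, col, n):
--     # To validate in the rows
--     if n in board[row]:
--         return False
--     # To validate in the columns
--     for r in range(len(board)):
--         if(board[r][col] == n):
--             return False
--     return True
--
-- def SolveSquare(board, row, col):
--     # Out Recursive Def
--     if(row >= n):
--         return True
--     for num in range(1, n+1):
--         if(isValid(board, row, col, num)):
--             board[row][col] = num
--             if(col == n-1):
--                 if(SolveSquare(board, row+1, 0)):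
--                     return True
--             # Continue in the next col
--             elif(SolveSquare(board, row, col+1)):
--                 return True
--             board[row][col] = 0
--
--     return False
-- ===== SOURCE B (Python) =====
-- n = 3
--
-- def SolveSquare(board, row, col):
--     if row >= n:
--         return True
--     # iterative backtracking: flat cell index k, last[k] = last number placed at k
--     start = row * n + col
--     last = [0] * (n * n)
--     k = start
--     while start <= k < n * n:
--         r, c = divmod(k, n)
--         if last[k]:
--             board[r][c] = 0          # undo the previous placement before retrying
--         num = last[k] + 1
--         while num <= n and (num in board[r] or num in [rw[c] for rw in board]):
--             num += 1
--         if num <= n: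
--             board[r][c] = num
--             last[k] = num
--             k += 1                   # advance to the next cell
--         else:
--             last[k] = 0
--             k -= 1                   # this cell is exhausted: backtrack
--     return k >= n * n
-- ===== Notes on version B (the rewrite author's own statement) =====
-- stated objective: alternative
-- what changed: Replaces A's mutual recursion over (row,col) with two call sites by a single iterative while loop over a flat cell index: an explicit state machine keeping a last[] array of the last number placed at each cell, advancing on a successful placement and retreating (resetting the cell and its last entry) when a cell exhausts 1..n; side effects on the board are reproduced exactly.
-- outside the precondition, e.g. on SolveSquare([[0, 0, 0], [0, 0, 0], [0, 0, 0]], 0, -1): A returns False, B returns True; on SolveSquare([[0, 2, 3, 3], [3, 2, 1], [2, 1], [2]], 2, 2): A returns False, B raises IndexError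
import Mathlib
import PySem

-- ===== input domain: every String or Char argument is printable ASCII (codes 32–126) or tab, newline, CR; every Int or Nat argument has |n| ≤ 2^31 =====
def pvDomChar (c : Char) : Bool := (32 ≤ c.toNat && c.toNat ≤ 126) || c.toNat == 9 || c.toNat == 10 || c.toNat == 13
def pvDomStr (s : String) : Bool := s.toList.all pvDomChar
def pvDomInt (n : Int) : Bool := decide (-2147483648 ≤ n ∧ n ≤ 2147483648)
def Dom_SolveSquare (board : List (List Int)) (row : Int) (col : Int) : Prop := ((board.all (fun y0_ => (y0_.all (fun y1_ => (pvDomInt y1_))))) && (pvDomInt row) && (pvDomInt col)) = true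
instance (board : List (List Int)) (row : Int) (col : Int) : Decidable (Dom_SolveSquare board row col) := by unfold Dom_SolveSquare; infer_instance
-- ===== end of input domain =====

-- B replaces A's mutual recursion over (row,col) by a single iterative while loop: an explicit
-- state machine over a flat cell index with a last[] array of the last number placed at each cell
-- (objective: alternative decomposition, same cost). Both Pythons mutate `board` in place
-- identically; the theorems below are about the return value.

-- ===== PORT A =====

-- `for r in range(len(board)): if board[r][col] == n: return False` — loop over the index list
def pvColScanA (board : List (List Int)) (col num : Int) : List Int → Option Bool
  | [] => some true
  | r :: rest =>
    match PySem.List.pyGet? board r with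
    | none => none
    | some rw =>
      match PySem.List.pyGet? rw col with
      | none => none
      | some v => if v == num then some false else pvColScanA board col num rest

def pvIsValidA (board : List (List Int)) (row col num : Int) : Option Bool :=
  match PySem.List.pyGet? board row with
  | none => none
  | some rw =>
    if rw.contains num then some false
    else pvColScanA board col num (PySem.List.pyRange 0 board.length 1)

-- `board[row][col] = v` (returns the new outer list; none = IndexError)
def pvSetCellA (board : List (List Int)) (r c v : Int) : Option (List (List Int)) :=
  match PySem.List.pyGet? board r with
  | none => none
  | some rw =>
    match PySem.List.pySet? rw c v with
    | none => none
    | some rw' => PySem.List.pySet? board r rw'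

-- the recursion of A, with the mutated board threaded through; fuel only makes it total
-- (fuel bounds the recursion DEPTH; 64 is far above the ≤ 11 reached on any Pre_ input)
mutual
def pvSolveA (fuel : Nat) (board : List (List Int)) (row col : Int) :
    Option (Bool × List (List Int)) :=
  match fuel with
  | 0 => none
  | Nat.succ f =>
    if 3 ≤ row then some (true, board)
    else pvTryA f board row col 1
  termination_by (fuel, 0)

def pvTryA (fuel : Nat) (board : List (List Int)) (row col num : Int) :
    Option (Bool × List (List Int)) :=
  if 3 < num then some (false, board)
  else
    match pvIsValidA board row col num with
    | none => none
    | some false => pvTryA fuel board row col (num + 1)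
    | some true =>
      match pvSetCellA board row col num with
      | none => none
      | some b1 =>
        match (if col == 2 then pvSolveA fuel b1 (row + 1) 0 else pvSolveA fuel b1 row (col + 1)) with
        | none => none
        | some (true, b2) => some (true, b2)
        | some (false, b2) =>
          match pvSetCellA b2 row col 0 with
          | none => none
          | some b3 => pvTryA fuel b3 row col (num + 1)
  termination_by (fuel, (4 - num).toNat)
end

def SolveSquare (board : List (List Int)) (row : Int) (col : Int) : Bool :=
  match pvSolveA 64 board row col with
  | some (b, _) => b
  | none => false

-- ===== PORT B =====

-- `[rw[c] for rw in board]`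
def pvColumnB (c : Int) : List (List Int) → Option (List Int)
  | [] => some []
  | rw :: rest =>
    match PySem.List.pyGet? rw c with
    | none => none
    | some v =>
      match pvColumnB c rest with
      | none => none
      | some vs => some (v :: vs)

-- `board[r][c] = v`
def pvSetCellB (board : List (List Int)) (r c v : Int) : Option (List (List Int)) :=
  match PySem.List.pyGet? board r with
  | none => none
  | some rw =>
    match PySem.List.pySet? rw c v with
    | none => none
    | some rw' => PySem.List.pySet? board r rw'

-- `while num <= n and (num in board[r] or num in [rw[c] for rw in board]): num += 1`
def pvScanB (board : List (List Int)) (r c num : Int) : Option Int :=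
  if h : num ≤ 3 then
    match PySem.List.pyGet? board r with
    | none => none
    | some rw =>
      if rw.contains num then pvScanB board r c (num + 1)
      else
        match pvColumnB c board with
        | none => none
        | some cv =>
          if cv.contains num then pvScanB board r c (num + 1) else some num
  else some num
  termination_by (4 - num).toNat
  decreasing_by all_goals omega

-- the body of B's while loop: one iteration, producing either the next state or the exit value
def pvStepB (start : Int) (bd : List (List Int)) (k : Int) (last : List Int) :
    Option ((List (List Int) × Int × List Int) ⊕ (Bool × List (List Int))) :=
  if start ≤ k ∧ k < 9 then
    match PySem.Int.divmod? k 3 with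
    | none => none
    | some (r, c) =>
      match PySem.List.pyGet? last k with
      | none => none
      | some m =>
        match (if m ≠ 0 then pvSetCellB bd r c 0 else some bd) with
        | none => none
        | some bd1 =>
          match pvScanB bd1 r c (m + 1) with
          | none => none
          | some num =>
            if num ≤ 3 then
              match pvSetCellB bd1 r c num, PySem.List.pySet? last k num with
              | some bd2, some last2 => some (Sum.inl (bd2, k + 1, last2))
              | _, _ => none
            else
              match PySem.List.pySet? last k 0 with
              | none => none
              | some last2 => some (Sum.inl (bd1, k - 1, last2))
  else some (Sum.inr (decide (9 ≤ k), bd))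

-- `while start <= k < n*n: …`; fuel only makes the loop total (≤ 4^10 iterations are ever
-- reached on a Pre_ input, see the proofs below)
def pvLoopB : Nat → Int → List (List Int) → Int → List Int → Option (Bool × List (List Int))
  | 0, _, _, _, _ => none
  | Nat.succ f, start, bd, k, last =>
    match pvStepB start bd k last with
    | none => none
    | some (Sum.inr v) => some v
    | some (Sum.inl (bd', k', last')) => pvLoopB f start bd' k' last'

def SolveSquare_alt (board : List (List Int)) (row : Int) (col : Int) : Bool :=
  if 3 ≤ row then true
  else
    match pvLoopB 2097152 (row * 3 + col) board (row * 3 + col) (List.replicate 9 0) with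
    | some (b, _) => b
    | none => false

-- ===== PRECONDITION & SPEC =====
-- Pre_ excludes the inputs on which A raises IndexError (non-3×3 boards, out-of-range start cell)
-- and the negative-index inputs where Python's wraparound makes A's value an accident.
def Pre_SolveSquare (board : List (List Int)) (row : Int) (col : Int) : Prop :=
  3 ≤ row ∨
    (0 ≤ row ∧ row < 3 ∧ 0 ≤ col ∧ col < 3 ∧ board.length = 3 ∧ ∀ rw ∈ board, rw.length = 3)
instance (board : List (List Int)) (row : Int) (col : Int) : Decidable (Pre_SolveSquare board row col) := by
  unfold Pre_SolveSquare; infer_instance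

def pvWitness_SolveSquare : List (List Int) × Int × Int := ([[0, 0, 0], [0, 0, 0], [0, 0, 0]], 0, 0)

def Spec_SolveSquare (board : List (List Int)) (row : Int) (col : Int) (out : Bool) : Prop := out = SolveSquare_alt board row col
instance (board : List (List Int)) (row : Int) (col : Int) (out : Bool) : Decidable (Spec_SolveSquare board row col out) := by unfold Spec_SolveSquare; infer_instance

-- ===== CLAIM (what is proved, stated in full; the proofs are below) =====
def Claim_equal_SolveSquare : Prop := ∀ (board : List (List Int)) (row : Int) (col : Int), Dom_SolveSquare board row col → Pre_SolveSquare board row col → Spec_SolveSquare board row col (SolveSquare board row col)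

-- ===== LEMMAS AND PROOFS =====

def pvShape (board : List (List Int)) : Prop :=
  board.length = 3 ∧ ∀ rw ∈ board, rw.length = 3

theorem pvPySet?_char {α : Type} (xs : List α) (i : Int) (v : α) (ys : List α)
    (h : PySem.List.pySet? xs i v = some ys) : ∃ k, k < xs.length ∧ ys = xs.set k v := by
  unfold PySem.List.pySet? PySem.List.pyIdx? at h
  split_ifs at h with h1 h2 h3 <;> simp only [Option.map_some, Option.map_none] at h
  · exact ⟨i.toNat, by omega, by simpa using h.symm⟩
  · cases h
  · exact ⟨xs.length - (-i).toNat, by omega, by simpa using h.symm⟩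
  · cases h

theorem pvPySet?_nonneg {α : Type} (xs : List α) (i : Int) (v : α)
    (h0 : 0 ≤ i) (h : i < xs.length) :
    PySem.List.pySet? xs i v = some (xs.set i.toNat v) := by
  unfold PySem.List.pySet? PySem.List.pyIdx?
  split_ifs <;> simp_all

theorem pvSetCell_eq (board : List (List Int)) (r c v : Int) :
    pvSetCellA board r c v = pvSetCellB board r c v := rfl

theorem pvSetCellA_shape (board b' : List (List Int)) (r c v : Int)
    (hs : pvShape board) (h : pvSetCellA board r c v = some b') : pvShape b' := by
  unfold pvSetCellA at h
  obtain ⟨hlen, hrows⟩ := hs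
  cases hg : PySem.List.pyGet? board r with
  | none => rw [hg] at h; cases h
  | some rw =>
    simp only [hg] at h
    cases hg2 : PySem.List.pySet? rw c v with
    | none => simp [hg2] at h
    | some rw' =>
      simp only [hg2] at h
      have hrw : rw ∈ board := by
        apply PySem.List.mem_of_pyGet?_eq_some (i := r); exact hg
      obtain ⟨k, hk, hkeq⟩ := pvPySet?_char rw c v rw' hg2
      obtain ⟨m, hm, hmeq⟩ := pvPySet?_char board r rw' b' h
      subst hkeq hmeq
      constructor
      · simp [hlen]
      · intro x hx
        rcases List.mem_or_eq_of_mem_set hx with hx' | hx'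
        · exact hrows x hx'
        · subst hx'; simp [hrows rw hrw]

theorem pvSetCellA_some (board : List (List Int)) (r c v : Int)
    (hlen : board.length = 3) (hrows : ∀ rw ∈ board, rw.length = 3)
    (hr0 : 0 ≤ r) (hr : r < 3) (hc0 : 0 ≤ c) (hc : c < 3) :
    pvSetCellA board r c v =
      some (board.set r.toNat ((board[r.toNat]'(by omega)).set c.toNat v)) := by
  have hg : PySem.List.pyGet? board r = some (board[r.toNat]'(by omega)) :=
    PySem.List.pyGet?_eq_some_getElem board hr0 (by omega)
  have hmem : (board[r.toNat]'(by omega)) ∈ board := List.getElem_mem _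
  have hlen2 : (board[r.toNat]'(by omega) : List Int).length = 3 := hrows _ hmem
  have hg2 := pvPySet?_nonneg (board[r.toNat]'(by omega)) c v hc0 (by omega)
  unfold pvSetCellA
  rw [hg]
  simp only []
  rw [hg2]
  simp only []
  exact pvPySet?_nonneg board r _ hr0 (by omega)

theorem pvRowGet (rw : List Int) (c : Int) (h3 : rw.length = 3) (hc0 : 0 ≤ c) (hc : c < 3) :
    PySem.List.pyGet? rw c = some (PySem.List.pyGetD rw c 0) := by
  unfold PySem.List.pyGetD
  rw [PySem.List.pyGet?_eq_some_getElem rw hc0 (by omega)]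
  rfl

theorem pvColumnB_some' (c : Int) (rows : List (List Int))
    (hs : ∀ rw ∈ rows, rw.length = 3) (hc0 : 0 ≤ c) (hc : c < 3) :
    pvColumnB c rows = some (rows.map (fun rw => PySem.List.pyGetD rw c 0)) := by
  induction rows with
  | nil => rfl
  | cons rw rest ih =>
    have h3 : rw.length = 3 := hs rw (by simp)
    unfold pvColumnB
    rw [pvRowGet rw c h3 hc0 hc, ih (fun x hx => hs x (by simp [hx]))]
    exact rfl

theorem pvColScanA_eq' (board : List (List Int)) (c num : Int)
    (hlen : board.length = 3) (hrows : ∀ rw ∈ board, rw.length = 3) (hc0 : 0 ≤ c) (hc : c < 3) :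
    pvColScanA board c num (PySem.List.pyRange 0 (board.length : Int) 1) =
      some (!(board.map (fun rw => PySem.List.pyGetD rw c 0)).contains num) := by
  obtain ⟨r0, r1, r2, rfl⟩ := List.length_eq_three.mp hlen
  have h0 : r0.length = 3 := hrows _ (by simp)
  have h1 : r1.length = 3 := hrows _ (by simp)
  have h2 : r2.length = 3 := hrows _ (by simp)
  rw [show (([r0, r1, r2] : List (List Int)).length : Int) = 3 by simp,
      show PySem.List.pyRange 0 3 1 = [0, 1, 2] from by decide]
  have g0 : PySem.List.pyGet? [r0, r1, r2] (0 : Int) = some r0 := by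
    rw [PySem.List.pyGet?_eq_some_getElem _ (by omega) (by simp)]
    rfl
  have g1 : PySem.List.pyGet? [r0, r1, r2] (1 : Int) = some r1 := by
    rw [PySem.List.pyGet?_eq_some_getElem _ (by omega) (by simp)]
    rfl
  have g2 : PySem.List.pyGet? [r0, r1, r2] (2 : Int) = some r2 := by
    rw [PySem.List.pyGet?_eq_some_getElem _ (by omega) (by simp)]
    rfl
  simp only [pvColScanA, g0, g1, g2, pvRowGet r0 c h0 hc0 hc, pvRowGet r1 c h1 hc0 hc,
    pvRowGet r2 c h2 hc0 hc, List.map, List.contains]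
  split_ifs <;> simp_all <;> omega

theorem pvIsValidA_eq (bd : List (List Int)) (row col num : Int)
    (hs : pvShape bd) (hr0 : 0 ≤ row) (hr : row < 3) (hc0 : 0 ≤ col) (hc : col < 3) :
    pvIsValidA bd row col num =
      some (!((bd[row.toNat]'(by obtain ⟨hl, _⟩ := hs; omega)).contains num) &&
            !((bd.map (fun rw => PySem.List.pyGetD rw col 0)).contains num)) := by
  obtain ⟨hlen, hrows⟩ := hs
  have hg : PySem.List.pyGet? bd row = some (bd[row.toNat]'(by omega)) :=
    PySem.List.pyGet?_eq_some_getElem bd hr0 (by omega)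
  unfold pvIsValidA
  rw [hg]
  simp only []
  cases hm : (bd[row.toNat]'(by omega)).contains num with
  | true => simp
  | false =>
    rw [if_neg (by decide), pvColScanA_eq' bd col num hlen hrows hc0 hc]
    simp

-- ---- machine infrastructure ----

def pvIter : Nat → Int → (List (List Int) × Int × List Int) →
    Option ((List (List Int) × Int × List Int) ⊕ (Bool × List (List Int)))
  | 0, _, s => some (Sum.inl s)
  | Nat.succ T, start, (bd, k, last) =>
    match pvStepB start bd k last with
    | none => none
    | some (Sum.inr v) => some (Sum.inr v)
    | some (Sum.inl s') => pvIter T start s'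

theorem pvIter_inr_loop (T : Nat) :
    ∀ (f : Nat) (start : Int) (bd : List (List Int)) (k : Int) (last : List Int)
      (v : Bool × List (List Int)),
      pvIter T start (bd, k, last) = some (Sum.inr v) → T ≤ f →
      pvLoopB f start bd k last = some v := by
  induction T with
  | zero => intro f start bd k last v h _; simp [pvIter] at h
  | succ T ih =>
    intro f start bd k last v h hf
    rw [pvIter] at h
    obtain ⟨f', rfl⟩ : ∃ f', f = f' + 1 := ⟨f - 1, by omega⟩
    rw [pvLoopB]
    cases hstep : pvStepB start bd k last with
    | none => rw [hstep] at h; cases h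
    | some s =>
      rw [hstep] at h
      cases s with
      | inr v' => cases h; rfl
      | inl s' =>
        obtain ⟨b', k', l'⟩ := s'
        simp only [] at h ⊢
        exact ih f' start b' k' l' v h (by omega)

theorem pvIter_comp (T : Nat) :
    ∀ (T' : Nat) (start : Int) (s s' : List (List Int) × Int × List Int),
      pvIter T start s = some (Sum.inl s') →
      pvIter (T + T') start s = pvIter T' start s' := by
  induction T with
  | zero =>
    intro T' start s s' h
    simp [pvIter] at h
    subst h
    simp
  | succ T ih =>
    intro T' start s s' h
    obtain ⟨bd, k, last⟩ := s
    rw [pvIter] at h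
    have : T + 1 + T' = (T + T') + 1 := by omega
    rw [this, pvIter]
    cases hstep : pvStepB start bd k last with
    | none => rw [hstep] at h; cases h
    | some sv =>
      rw [hstep] at h
      cases sv with
      | inr v => cases h
      | inl s1 => simp only [] at h ⊢; exact ih T' start s1 s' h

-- list-set bookkeeping
theorem pvSetSame (l : List Int) (k : Nat) (hk : k < l.length) (h0 : l.getD k 0 = 0) :
    l.set k 0 = l := by
  apply List.ext_getElem
  · simp
  · intro i h1 h2
    by_cases hik : i = k
    · subst hik
      rw [List.getElem_set_self]
      rw [List.getD_eq_getElem l 0 hk] at h0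
      exact h0.symm
    · rw [List.getElem_set_ne (by omega)]

-- divmod(k, 3) for k = row*3 + col with 0 ≤ col < 3
theorem pvDivmod3 (row col : Int) (hc0 : 0 ≤ col) (hc : col < 3) :
    PySem.Int.divmod? (row * 3 + col) 3 = some (row, col) := by
  unfold PySem.Int.divmod?
  rw [if_neg (by norm_num)]
  have h1 : (row * 3 + col).fdiv 3 = row := by rw [Int.fdiv_eq_ediv]; simp; omega
  have h2 : (row * 3 + col).fmod 3 = col := by rw [Int.fmod_eq_emod]; simp; omega
  rw [h1, h2]

-- the inner while scan: finds the first valid number ≥ num (or stops past 3), and A's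
-- num-loop is unchanged by skipping the invalid numbers
theorem pvScan_spec (fG : Nat) (bd : List (List Int)) (row col : Int)
    (hs : pvShape bd) (hr0 : 0 ≤ row) (hr : row < 3) (hc0 : 0 ≤ col) (hc : col < 3) :
    ∀ (cnt : Nat) (num : Int), 1 ≤ num → (4 - num).toNat ≤ cnt →
      ∃ ns, pvScanB bd row col num = some ns ∧ num ≤ ns ∧
        pvTryA fG bd row col num = pvTryA fG bd row col ns ∧
        (3 < ns ∨ (ns ≤ 3 ∧ pvIsValidA bd row col ns = some true)) := by
  intro cnt
  induction cnt with
  | zero =>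
    intro num h1 hk
    refine ⟨num, ?_, le_refl _, rfl, Or.inl (by omega)⟩
    rw [pvScanB, dif_neg (by omega : ¬ num ≤ 3)]
  | succ cnt ih =>
    intro num h1 hk
    by_cases h3 : num ≤ 3
    · obtain ⟨hlen, hrows⟩ := hs
      have hg : PySem.List.pyGet? bd row = some (bd[row.toNat]'(by omega)) :=
        PySem.List.pyGet?_eq_some_getElem bd hr0 (by omega)
      have hv := pvIsValidA_eq bd row col num ⟨hlen, hrows⟩ hr0 hr hc0 hc
      rw [pvScanB, dif_pos h3, hg]
      simp only []
      have hskip : pvIsValidA bd row col num = some false →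
          pvTryA fG bd row col num = pvTryA fG bd row col (num + 1) := by
        intro hvf
        rw [pvTryA, if_neg (by omega : ¬ 3 < num), hvf]
      cases hm : (bd[row.toNat]'(by omega)).contains num with
      | true =>
        rw [if_pos rfl]
        obtain ⟨ns, hscan, hge, htry, hval⟩ := ih (num + 1) (by omega) (by omega)
        refine ⟨ns, hscan, by omega, ?_, hval⟩
        rw [hskip (by rw [hv, hm]; simp), htry]
      | false =>
        rw [if_neg (by decide), pvColumnB_some' col bd hrows hc0 hc]
        simp only []
        cases hcm : (bd.map (fun rw => PySem.List.pyGetD rw col 0)).contains num with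
        | true =>
          rw [if_pos rfl]
          obtain ⟨ns, hscan, hge, htry, hval⟩ := ih (num + 1) (by omega) (by omega)
          refine ⟨ns, hscan, by omega, ?_, hval⟩
          rw [hskip (by rw [hv, hm, hcm]; simp), htry]
        | false =>
          rw [if_neg (by decide)]
          exact ⟨num, rfl, le_refl _, rfl,
            Or.inr ⟨h3, by rw [hv, hm, hcm]; simp⟩⟩
    · refine ⟨num, ?_, le_refl _, rfl, Or.inl (by omega)⟩
      rw [pvScanB, dif_neg h3]

-- main simulation: A's recursion from (row,col) and the machine from flat index k = row*3+col
-- compute the same result and the same final board, in a bounded number of machine steps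
theorem pvMainSim (fA : Nat) :
    ∀ (row col : Int) (bd : List (List Int)) (last : List Int) (start : Int),
      pvShape bd → last.length = 9 →
      ((0 ≤ row ∧ row < 3 ∧ 0 ≤ col ∧ col < 3) ∨ (row = 3 ∧ col = 0)) →
      start ≤ row * 3 + col →
      (∀ j : Nat, (row * 3 + col).toNat ≤ j → j < 9 → last.getD j 0 = 0) →
      (9 - (row * 3 + col)).toNat < fA →
      ∃ res bfin, pvSolveA fA bd row col = some (res, bfin) ∧ pvShape bfin ∧
        ∃ T, T ≤ 4 ^ (10 - (row * 3 + col).toNat) ∧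
          pvIter T start (bd, row * 3 + col, last) =
            some (if res then Sum.inr (true, bfin)
                  else Sum.inl (bfin, row * 3 + col - 1, last)) := by
  induction fA with
  | zero => intro row col bd last start _ _ hrange _ _ hfA; omega
  | succ fG ih =>
    intro row col bd last start hs hlast hrange hstart hzero hfA
    rcases hrange with ⟨hr0, hr, hc0, hc⟩ | ⟨hr3, hc0'⟩
    · -- k = row*3+col < 9 : one frame of A's num-loop ≈ machine activations at k
      set k : Int := row * 3 + col with hkdef
      have hk0 : 0 ≤ k := by omega
      have hk9 : k < 9 := by omega
      rw [pvSolveA, if_neg (by omega : ¬ 3 ≤ row)]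
      -- inner induction over the num counter (with the scan jumping over invalid nums)
      have aux : ∀ (cnt : Nat) (num : Int) (bdM bd : List (List Int)) (last : List Int),
          pvShape bd → last.length = 9 → 1 ≤ num → (4 - num).toNat ≤ cnt →
          (∀ j : Nat, k.toNat < j → j < 9 → last.getD j 0 = 0) →
          last.getD k.toNat 0 = num - 1 →
          (if num = 1 then bdM = bd else pvSetCellB bdM row col 0 = some bd) →
          ∃ res bfin, pvTryA fG bd row col num = some (res, bfin) ∧ pvShape bfin ∧
            ∃ T, T ≤ (4 - num).toNat * (1 + 4 ^ (9 - k.toNat)) + 1 ∧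
              pvIter T start (bdM, k, last) =
                some (if res then Sum.inr (true, bfin)
                      else Sum.inl (bfin, k - 1, last.set k.toNat 0)) := by
        intro cnt
        induction cnt with
        | zero =>
          intro num bdM bd last hsb hl h1 hcnt hz hlk hrel
          -- num ≥ 4: A's loop exits at once; the machine's scan also exits and retreats
          have h4 : 4 ≤ num := by omega
          -- but pvScanB starts at num, which is > 3, and last.getD k = num-1 ∈ {3,...};
          -- machine: reset (num-1 ≠ 0), scan gives num > 3, retreat
          refine ⟨false, bd, ?_, hsb, 1, Nat.le_add_left 1 _, ?_⟩
          · rw [pvTryA, if_pos (by omega : 3 < num)]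
          · rw [show (1 : Nat) = 0 + 1 from rfl, pvIter]
            rw [pvStepB, if_pos ⟨by omega, hk9⟩, hkdef, pvDivmod3 row col hc0 hc]
            have hgl : PySem.List.pyGet? last k = some (num - 1) := by
              rw [PySem.List.pyGet?_eq_some_getElem last hk0 (by omega)]
              rw [← List.getD_eq_getElem last 0 (by omega : k.toNat < last.length)]
              rw [hlk]
            rw [← hkdef, hgl]
            simp only []
            rw [if_pos (by omega : num - 1 ≠ 0)]
            rw [if_neg (by omega : ¬ num = 1)] at hrel
            rw [hrel]
            simp only []
            obtain ⟨ns, hscan, hge, _, _⟩ :=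
              pvScan_spec fG bd row col hsb hr0 hr hc0 hc 0 num (by omega) (by omega)
            rw [show num - 1 + 1 = num from by omega, hscan]
            simp only []
            rw [if_neg (by omega : ¬ ns ≤ 3)]
            have hsetl : PySem.List.pySet? last k 0 = some (last.set k.toNat 0) :=
              pvPySet?_nonneg last k 0 hk0 (by omega)
            rw [hsetl]
            simp [pvIter]
        | succ cnt ihk =>
          intro num bdM bd last hsb hl h1 hcnt hz hlk hrel
          -- machine step at k: read last[k] = num-1, reset if needed, scan from num
          have hgl : PySem.List.pyGet? last k = some (num - 1) := by
            rw [PySem.List.pyGet?_eq_some_getElem last hk0 (by omega)]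
            rw [← List.getD_eq_getElem last 0 (by omega : k.toNat < last.length)]
            rw [hlk]
          obtain ⟨ns, hscan, hge, htry, hval⟩ :=
            pvScan_spec fG bd row col hsb hr0 hr hc0 hc (4 - num).toNat.succ num h1 (by omega)
          have hstepB : pvStepB start bdM k last =
              (if ns ≤ 3 then
                 match pvSetCellB bd row col ns, PySem.List.pySet? last k ns with
                 | some bd2, some last2 => some (Sum.inl (bd2, k + 1, last2))
                 | _, _ => none
               else
                 match PySem.List.pySet? last k 0 with
                 | none => none
                 | some last2 => some (Sum.inl (bd, k - 1, last2))) := by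
            rw [pvStepB, if_pos ⟨by omega, hk9⟩, hkdef, pvDivmod3 row col hc0 hc, ← hkdef, hgl]
            simp only []
            by_cases hn1 : num = 1
            · rw [if_neg (by omega : ¬ num - 1 ≠ 0)]
              rw [if_pos hn1] at hrel
              subst hrel
              simp only []
              rw [show num - 1 + 1 = num from by omega, hscan]
            · rw [if_pos (by omega : num - 1 ≠ 0)]
              rw [if_neg hn1] at hrel
              rw [hrel]
              simp only []
              rw [show num - 1 + 1 = num from by omega, hscan]
          rcases hval with hns4 | ⟨hns3, hvalid⟩
          · -- scan exhausted: A's loop also returns False here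
            refine ⟨false, bd, ?_, hsb, 1, Nat.le_add_left 1 _, ?_⟩
            · rw [htry, pvTryA, if_pos (by omega : 3 < ns)]
            · rw [show (1 : Nat) = 0 + 1 from rfl, pvIter, hstepB,
                if_neg (by omega : ¬ ns ≤ 3),
                pvPySet?_nonneg last k 0 hk0 (by omega)]
              simp [pvIter]
          · -- valid ns ≤ 3: place it, recurse deeper, then continue from ns+1 on failure
            obtain ⟨hlen, hrows⟩ := hsb
            have hset := pvSetCellA_some bd row col ns hlen hrows hr0 hr hc0 hc
            set bd2 := bd.set row.toNat ((bd[row.toNat]'(by omega)).set col.toNat ns) with hbd2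
            have hsb2 : pvShape bd2 := pvSetCellA_shape bd bd2 row col ns ⟨hlen, hrows⟩ hset
            have hsetl : PySem.List.pySet? last k ns = some (last.set k.toNat ns) :=
              pvPySet?_nonneg last k ns hk0 (by omega)
            -- the deeper call: next cell is flat index k+1 in both of A's branches
            have hnext : ∃ row' col', (row' * 3 + col' = k + 1) ∧
                ((0 ≤ row' ∧ row' < 3 ∧ 0 ≤ col' ∧ col' < 3) ∨ (row' = 3 ∧ col' = 0)) ∧
                (if col == 2 then pvSolveA fG bd2 (row + 1) 0 else pvSolveA fG bd2 row (col + 1))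
                  = pvSolveA fG bd2 row' col' := by
              by_cases hc2 : col = 2
              · refine ⟨row + 1, 0, by omega, by omega, ?_⟩
                rw [if_pos (by simpa using hc2)]
              · refine ⟨row, col + 1, by omega, by omega, ?_⟩
                rw [if_neg (by simpa using hc2)]
            obtain ⟨row', col', hk1, hrange', hbranch⟩ := hnext
            have hz' : ∀ j : Nat, (row' * 3 + col').toNat ≤ j → j < 9 →
                (last.set k.toNat ns).getD j 0 = 0 := by
              intro j hj hj9
              rw [List.getD_eq_getElem _ 0 (by simp; omega),
                  List.getElem_set_ne (by omega)]
              rw [← List.getD_eq_getElem last 0 (by omega)]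
              exact hz j (by omega) hj9
            obtain ⟨res2, b2, hsolve2, hsb2', T2, hT2, hiter2⟩ :=
              ih row' col' bd2 (last.set k.toNat ns) start hsb2 (by simp [hl])
                hrange' (by omega) hz' (by omega)
            have hiterstep : pvIter 1 start (bdM, k, last) =
                some (Sum.inl (bd2, k + 1, last.set k.toNat ns)) := by
              rw [show (1 : Nat) = 0 + 1 from rfl, pvIter, hstepB, if_pos hns3,
                ← pvSetCell_eq, hset, hsetl]
              rfl
            -- A's loop at ns: valid, place, recurse
            rw [htry, pvTryA, if_neg (by omega : ¬ 3 < ns), hvalid]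
            simp only []
            rw [hset]
            simp only []
            rw [hbranch, hk1] at *
            rw [hsolve2]
            cases res2 with
            | true =>
              -- deeper success: machine runs to the exit with the same board
              rw [if_pos rfl] at hiter2
              have hT2' : T2 ≤ 4 ^ (9 - k.toNat) := by
                have hexp : 10 - ((k + 1 : Int)).toNat = 9 - k.toNat := by omega
                rwa [hexp] at hT2
              refine ⟨true, b2, rfl, hsb2', 1 + T2, ?_, ?_⟩
              · have hmul := Nat.le_mul_of_pos_left (1 + 4 ^ (9 - k.toNat))
                  (by omega : 0 < (4 - num).toNat)
                omega
              · rw [pvIter_comp 1 T2 start _ _ hiterstep, if_pos rfl]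
                exact hiter2
            | false =>
              -- deeper failure: machine is back at k with last[k] = ns; A resets the cell
              rw [if_neg (by simp)] at hiter2
              obtain ⟨hlen2, hrows2⟩ := hsb2'
              have hset0 := pvSetCellA_some b2 row col 0 hlen2 hrows2 hr0 hr hc0 hc
              set b3 := b2.set row.toNat ((b2[row.toNat]'(by omega)).set col.toNat 0) with hb3
              have hsb3 : pvShape b3 := pvSetCellA_shape b2 b3 row col 0 ⟨hlen2, hrows2⟩ hset0
              simp only [hset0]
              have hlk' : (last.set k.toNat ns).getD k.toNat 0 = ns + 1 - 1 := by
                rw [List.getD_eq_getElem _ 0 (by simp; omega), List.getElem_set_self]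
                omega
              have hz'' : ∀ j : Nat, k.toNat < j → j < 9 →
                  (last.set k.toNat ns).getD j 0 = 0 := by
                intro j hj hj9
                rw [List.getD_eq_getElem _ 0 (by simp; omega),
                    List.getElem_set_ne (by omega)]
                rw [← List.getD_eq_getElem last 0 (by omega)]
                exact hz j hj hj9
              obtain ⟨res, bfin, htryrec, hsfin, T3, hT3, hiter3⟩ :=
                ihk (ns + 1) b2 b3 (last.set k.toNat ns) hsb3 (by simp [hl]) (by omega)
                  (by omega) hz'' hlk'
                  (by rw [if_neg (by omega : ¬ ns + 1 = 1), ← pvSetCell_eq]; exact hset0)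
              have hT2' : T2 ≤ 4 ^ (9 - k.toNat) := by
                have hexp : 10 - ((k + 1 : Int)).toNat = 9 - k.toNat := by omega
                rwa [hexp] at hT2
              refine ⟨res, bfin, htryrec, hsfin, 1 + T2 + T3, ?_, ?_⟩
              · have hb3' : T3 ≤ (4 - (ns + 1)).toNat * (1 + 4 ^ (9 - k.toNat)) + 1 := hT3
                have hco : (1 + (4 - (ns + 1)).toNat) * (1 + 4 ^ (9 - k.toNat))
                    ≤ (4 - num).toNat * (1 + 4 ^ (9 - k.toNat)) :=
                  Nat.mul_le_mul_right _ (by omega)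
                have hexpand : (1 + (4 - (ns + 1)).toNat) * (1 + 4 ^ (9 - k.toNat))
                    = (1 + 4 ^ (9 - k.toNat))
                      + (4 - (ns + 1)).toNat * (1 + 4 ^ (9 - k.toNat)) := by ring
                omega
              · rw [show k + 1 - 1 = k from by omega] at hiter2
                rw [Nat.add_assoc, pvIter_comp 1 (T2 + T3) start _ _ hiterstep,
                  pvIter_comp T2 T3 start _ _ hiter2]
                rw [List.set_set] at hiter3
                exact hiter3
      obtain ⟨res, bfin, htry, hsfin, T, hT, hiter⟩ :=
        aux 3 1 bd bd last hs hlast (by omega) (by omega)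
          (fun j hj hj9 => hzero j (by omega) hj9)
          (by have := hzero k.toNat (by omega) (by omega); omega)
          (by rw [if_pos rfl])
      refine ⟨res, bfin, htry, hsfin, T, ?_, ?_⟩
      · have h1 : (4 - (1:Int)).toNat = 3 := by decide
        have hk8 : k.toNat ≤ 8 := by omega
        have hpow : 4 * 4 ^ (9 - k.toNat) = 4 ^ (10 - k.toNat) := by
          rw [← pow_succ']
          congr 1
          omega
        have h4 : 4 ≤ 4 ^ (9 - k.toNat) :=
          le_trans (by norm_num) (Nat.pow_le_pow_right (by norm_num) (by omega : 1 ≤ 9 - k.toNat))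
        calc T ≤ 3 * (1 + 4 ^ (9 - k.toNat)) + 1 := by rw [h1] at hT; exact hT
          _ ≤ 4 * 4 ^ (9 - k.toNat) := by omega
          _ = 4 ^ (10 - k.toNat) := hpow
      · rw [pvSetSame last k.toNat (by omega)
          (hzero k.toNat (by omega) (by omega))] at hiter
        exact hiter
    · -- k = 9: A succeeds immediately, the machine exits its loop at once
      subst hr3; subst hc0'
      rw [pvSolveA, if_pos (by omega : (3:Int) ≤ 3)]
      refine ⟨true, bd, rfl, hs, 1, Nat.one_le_pow _ _ (by norm_num), ?_⟩
      rw [show (1 : Nat) = 0 + 1 from rfl, pvIter, pvStepB,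
        if_neg (by omega : ¬ (start ≤ 3 * 3 + 0 ∧ (3:Int) * 3 + 0 < 9))]
      norm_num

-- ===== VERDICT (by name: the statement is the Claim_ definition above) =====
theorem SolveSquare_spec : Claim_equal_SolveSquare := by
  intro board row col _hdom hpre
  unfold Spec_SolveSquare SolveSquare SolveSquare_alt
  rcases hpre with hrow | ⟨hr0, hr, hc0, hc, hlen, hrows⟩
  · rw [pvSolveA, if_pos hrow, if_pos hrow]
  · rw [if_neg (by omega : ¬ 3 ≤ row)]
    obtain ⟨res, bfin, hsolve, _, T, hT, hiter⟩ :=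
      pvMainSim 64 row col board (List.replicate 9 0) (row * 3 + col)
        ⟨hlen, hrows⟩ (by simp) (by omega) (by omega)
        (fun j _ hj => List.getD_replicate 0 hj) (by omega)
    rw [hsolve]
    have hTbig : T ≤ 2097151 := le_trans hT (le_trans
      (Nat.pow_le_pow_right (by norm_num) (by omega : 10 - (row*3+col).toNat ≤ 10))
      (by norm_num))
    cases res with
    | true =>
      rw [if_pos rfl] at hiter
      rw [pvIter_inr_loop T 2097152 (row*3+col) board (row*3+col) (List.replicate 9 0)
        (true, bfin) hiter (by omega)]
    | false =>
      rw [if_neg (by simp)] at hiter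
      have hexit : pvIter (T + 1) (row*3+col) (board, row*3+col, List.replicate 9 0) =
          some (Sum.inr (false, bfin)) := by
        rw [pvIter_comp T 1 (row*3+col) _ _ hiter]
        rw [show (1 : Nat) = 0 + 1 from rfl, pvIter, pvStepB,
          if_neg (by omega : ¬ (row*3+col ≤ row*3+col - 1 ∧ row*3+col - 1 < 9))]
        rw [show (decide (9 ≤ row*3+col-1)) = false from by
          simp; omega]
      rw [pvIter_inr_loop (T+1) 2097152 (row*3+col) board (row*3+col) (List.replicate 9 0)
        (false, bfin) hexit (by omega)]
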